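-- pv_equiv track=rewrite | github.com/ikuchmar/OdooDev | _tu_helper/_Py_script/_make_video/0_split_lesson_file/split_lesson_file1.py | sanitize_block_text
-- ===== SOURCE A (Python) =====
-- def sanitize_block_text(text: str) -> str:
--     lines = text.splitlines()
--     while lines and lines[0].strip() == "":
--         lines.pop(0)
--     while lines and lines[-1].strip() == "":
--         lines.pop()
--     out, prev_empty = [], False
--     for ln in lines:
--         is_empty = (ln.strip() == "")
--         if is_empty and prev_empty:
--             continue
--         out.append(ln)
--         prev_empty = is_empty
--     if len(out) >= 2 and out[1].strip() != "":
--         out.insert(1, "")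
--     return "\n".join(out) + ("\n" if out else "")
-- ===== SOURCE B (Python) =====
-- def sanitize_block_text(text: str) -> str:
--     # Single reverse pass: walking back-to-front, blank lines are dropped at the
--     # tail, merged into the following blank (keeping the earliest of each run),
--     # or kept after a non-blank line; then one possible leading blank is dropped.
--     acc = []  # result lines, in reverse order
--     for ln in reversed(text.splitlines()):
--         if ln.strip():
--             acc.append(ln)
--         elif acc:
--             if acc[-1].strip():
--                 acc.append(ln)
--             else:
--                 acc[-1] = ln  # merge run: keep its earliest blank line
--         # blank line at the very end: drop
--     out = acc[::-1]
--     if out and not out[0].strip():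
--         out = out[1:]
--     if len(out) >= 2 and out[1].strip():
--         out = out[:1] + [""] + out[1:]
--     return "\n".join(out) + ("\n" if out else "")
-- ===== Notes on version B (the rewrite author's own statement) =====
-- stated objective: alternative
-- what changed: Replaces A's three forward passes (two edge pop-loops plus a prev_empty flag loop) by a single backward pass that drops trailing blanks, merges each blank run into its earliest line in-place, and finally strips at most one leading blank.
import Mathlib
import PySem

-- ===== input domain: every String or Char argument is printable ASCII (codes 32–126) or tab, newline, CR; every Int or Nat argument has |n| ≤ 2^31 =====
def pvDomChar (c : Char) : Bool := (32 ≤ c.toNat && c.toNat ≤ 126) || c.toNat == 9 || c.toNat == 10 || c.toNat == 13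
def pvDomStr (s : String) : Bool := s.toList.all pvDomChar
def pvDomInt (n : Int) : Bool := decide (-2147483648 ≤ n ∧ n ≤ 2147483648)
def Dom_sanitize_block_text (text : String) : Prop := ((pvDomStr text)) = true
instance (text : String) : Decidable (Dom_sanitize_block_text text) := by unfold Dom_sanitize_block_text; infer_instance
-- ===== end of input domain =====

-- B replaces A's three forward passes (two pop-loops + a prev_empty flag loop) by one
-- backward pass with a merge-in-place accumulator; objective: alternative decomposition.

-- ===== PORT A =====
def saTrimFront : List String → List String
  | [] => []
  | l :: ls => if PySem.Str.strip l == "" then saTrimFront ls else l :: ls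

def saTrimBack (xs : List String) : List String :=
  if h : xs = [] then xs
  else if PySem.Str.strip (xs.getLast h) == "" then saTrimBack xs.dropLast else xs
termination_by xs.length
decreasing_by
  have : xs.length ≠ 0 := fun hl => h (List.length_eq_zero_iff.mp hl)
  simp [List.length_dropLast]; omega

def saStep (st : List String × Bool) (ln : String) : List String × Bool :=
  let isEmpty := PySem.Str.strip ln == ""
  if isEmpty && st.2 then st else (st.1 ++ [ln], isEmpty)

def sanitize_block_text (text : String) : String :=
  let lines := saTrimBack (saTrimFront (PySem.Str.splitlines text))
  let out := (lines.foldl saStep ([], false)).1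
  let out :=
    if decide (2 ≤ out.length) && !(PySem.Str.strip (out.getD 1 "") == "") then
      PySem.List.insert out 1 ""
    else out
  PySem.Str.join "\n" out ++ (if out.isEmpty then "" else "\n")

-- ===== PORT B =====
def sbStep (acc : List String) (ln : String) : List String :=
  if PySem.Str.strip ln != "" then acc ++ [ln]
  else
    match acc.getLast? with
    | none => acc                           -- blank at the very end: drop
    | some l =>
      if PySem.Str.strip l != "" then acc ++ [ln]
      else acc.dropLast ++ [ln]             -- merge run: keep its earliest blank

def sanitize_block_text_alt (text : String) : String :=
  let acc := (PySem.Str.splitlines text).reverse.foldl sbStep []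
  let out := acc.reverse
  let out := if !out.isEmpty && (PySem.Str.strip (out.headD "") == "") then out.drop 1 else out
  let out :=
    if decide (2 ≤ out.length) && !(PySem.Str.strip (out.getD 1 "") == "") then
      out.take 1 ++ [""] ++ out.drop 1
    else out
  PySem.Str.join "\n" out ++ (if out.isEmpty then "" else "\n")

-- ===== PRECONDITION & SPEC =====
def Spec_sanitize_block_text (text : String) (out : String) : Prop := out = sanitize_block_text_alt text
instance (text : String) (out : String) : Decidable (Spec_sanitize_block_text text out) := by unfold Spec_sanitize_block_text; infer_instance

-- ===== CLAIM (what is proved, stated in full; the proofs are below) =====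
def Claim_equal_sanitize_block_text : Prop := ∀ (text : String), Dom_sanitize_block_text text → Spec_sanitize_block_text text (sanitize_block_text text)

-- ===== LEMMAS AND PROOFS =====

-- the blank-line test both programs use
def pvBl (l : String) : Bool := PySem.Str.strip l == ""

-- A's prev_empty loop, as structural recursion on the line list
def pvFcol (b : Bool) : List String → List String
  | [] => []
  | l :: ls => if pvBl l && b then pvFcol b ls else l :: pvFcol (pvBl l) ls

-- B's backward pass, as structural recursion on the (unreversed) line list
def pvGo : List String → List String
  | [] => []
  | l :: ls =>
    if pvBl l then
      match pvGo ls with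
      | [] => []
      | r0 :: rt => if pvBl r0 then l :: rt else l :: r0 :: rt
    else l :: pvGo ls

-- B's drop-one-leading-blank step
def pvDropLead (out : List String) : List String :=
  if !out.isEmpty && (PySem.Str.strip (out.headD "") == "") then out.drop 1 else out

theorem pvFcol_cons (b : Bool) (l : String) (ls : List String) :
    pvFcol b (l :: ls) = if pvBl l && b then pvFcol b ls else l :: pvFcol (pvBl l) ls := rfl

theorem pvGo_cons (l : String) (ls : List String) :
    pvGo (l :: ls) =
      if pvBl l then
        match pvGo ls with
        | [] => []
        | r0 :: rt => if pvBl r0 then l :: rt else l :: r0 :: rt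
      else l :: pvGo ls := rfl

theorem pvDropLead_cons_blank (l : String) (r : List String) (h : pvBl l) :
    pvDropLead (l :: r) = r := by
  unfold pvBl at h
  simp [pvDropLead, h]

theorem pvDropLead_cons_nonblank (l : String) (r : List String) (h : ¬ pvBl l) :
    pvDropLead (l :: r) = l :: r := by
  unfold pvBl at h
  simp [pvDropLead, h]

theorem pvTrimFront_eq (ls : List String) : saTrimFront ls = ls.dropWhile pvBl := by
  induction ls with
  | nil => rfl
  | cons l ls ih =>
    rw [saTrimFront, List.dropWhile]
    cases h : PySem.Str.strip l == "" <;> simp [pvBl, h, ih]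

theorem pvTrimBack_eq (ls : List String) : saTrimBack ls = ls.rdropWhile pvBl := by
  induction ls using List.reverseRecOn with
  | nil => simp [saTrimBack, List.rdropWhile]
  | append_singleton ls l ih =>
    have hne : ls ++ [l] ≠ [] := by simp
    rw [saTrimBack, List.rdropWhile_concat]
    simp only [dif_neg hne, List.getLast_append_singleton, List.dropLast_concat]
    cases h : PySem.Str.strip l == "" <;> simp [pvBl, h, ih]

theorem pvFoldl_saStep (ls : List String) (acc : List String) (b : Bool) :
    (ls.foldl saStep (acc, b)).1 = acc ++ pvFcol b ls := by
  induction ls generalizing acc b with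
  | nil => simp [pvFcol]
  | cons l ls ih =>
    simp only [List.foldl_cons, saStep, pvFcol_cons, pvBl]
    split_ifs with h <;> simp [ih]

theorem pvFoldl_sbStep (ls : List String) :
    (ls.reverse.foldl sbStep []).reverse = pvGo ls := by
  induction ls with
  | nil => rfl
  | cons l ls ih =>
    have hprev : List.foldl sbStep [] ls.reverse = (pvGo ls).reverse := by
      rw [← ih, List.reverse_reverse]
    rw [List.reverse_cons, List.foldl_append, List.foldl_cons, List.foldl_nil, hprev, pvGo_cons]
    cases hgo : pvGo ls with
    | nil =>
      by_cases h : PySem.Str.strip l = "" <;> simp [sbStep, pvBl, h]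
    | cons r0 rt =>
      by_cases h1 : PySem.Str.strip l = "" <;> by_cases h2 : PySem.Str.strip r0 = "" <;>
        simp [sbStep, pvBl, h1, h2, List.getLast?_reverse]

theorem pvRdropWhile_cons (p : String → Bool) (l : String) (ls : List String) :
    List.rdropWhile p (l :: ls) =
      if List.rdropWhile p ls = [] then (if p l then [] else [l])
      else l :: List.rdropWhile p ls := by
  have hdef : List.rdropWhile p (l :: ls) = ((ls.reverse ++ [l]).dropWhile p).reverse := by
    simp [List.rdropWhile]
  by_cases h : List.rdropWhile p ls = []
  · have h2 : List.dropWhile p ls.reverse = [] := by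
      simpa [List.rdropWhile, List.reverse_eq_nil_iff] using h
    rw [if_pos h, hdef, List.dropWhile_append, h2]
    cases hp : p l <;> simp [List.dropWhile, hp]
  · have h2 : (List.dropWhile p ls.reverse).isEmpty = false := by
      simp only [List.isEmpty_eq_false_iff, ne_eq]
      intro hc
      exact h (by simp [List.rdropWhile, hc])
    rw [if_neg h, hdef, List.dropWhile_append, h2]
    simp [List.rdropWhile]

theorem pvFcol_rdrop (ls : List String) :
    pvFcol false (List.rdropWhile pvBl ls) = pvGo ls := by
  induction ls with
  | nil => rfl
  | cons l ls ih =>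
    rw [pvRdropWhile_cons]
    by_cases hR : List.rdropWhile pvBl ls = []
    · have hgo : pvGo ls = [] := by rw [← ih, hR]; rfl
      rw [if_pos hR, pvGo_cons, hgo]
      by_cases hl : pvBl l
      · simp [hl, pvFcol]
      · simp [hl, pvFcol, pvFcol_cons]
    · rw [if_neg hR]
      rcases hcons : List.rdropWhile pvBl ls with _ | ⟨r0, rt⟩
      · exact absurd hcons hR
      · have hgo : pvGo ls = r0 :: pvFcol (pvBl r0) rt := by
          rw [← ih, hcons, pvFcol_cons]
          simp
        rw [pvGo_cons, hgo]
        by_cases hl : pvBl l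
        · by_cases hr0 : pvBl r0 <;> simp [pvFcol_cons, hl, hr0]
        · simp [pvFcol_cons, hl]

theorem pvGo_dropWhile (ls : List String) :
    pvGo (List.dropWhile pvBl ls) = pvDropLead (pvGo ls) := by
  induction ls with
  | nil => rfl
  | cons l ls ih =>
    by_cases hl : pvBl l
    · rw [List.dropWhile_cons_of_pos hl, ih, pvGo_cons, if_pos hl]
      cases hgo : pvGo ls with
      | nil => rfl
      | cons r0 rt =>
        rw [show (match r0 :: rt with
            | [] => ([] : List String)
            | r0 :: rt => if pvBl r0 then l :: rt else l :: r0 :: rt) =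
            if pvBl r0 then l :: rt else l :: r0 :: rt from rfl]
        by_cases hr0 : pvBl r0
        · rw [if_pos hr0, pvDropLead_cons_blank _ _ hl, pvDropLead_cons_blank _ _ hr0]
        · rw [if_neg hr0, pvDropLead_cons_blank _ _ hl, pvDropLead_cons_nonblank _ _ hr0]
    · rw [List.dropWhile_cons_of_neg hl, pvGo_cons, if_neg hl, pvDropLead_cons_nonblank _ _ hl]

theorem pvCoreEq (ls : List String) :
    ((saTrimBack (saTrimFront ls)).foldl saStep ([], false)).1 =
      (if !((ls.reverse.foldl sbStep []).reverse).isEmpty &&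
          (PySem.Str.strip (((ls.reverse.foldl sbStep []).reverse).headD "") == "")
       then ((ls.reverse.foldl sbStep []).reverse).drop 1
       else (ls.reverse.foldl sbStep []).reverse) := by
  show _ = pvDropLead ((ls.reverse.foldl sbStep []).reverse)
  rw [pvFoldl_saStep, pvTrimFront_eq, pvTrimBack_eq, pvFoldl_sbStep, List.nil_append,
    pvFcol_rdrop, pvGo_dropWhile]

theorem pvInsert_eq (out : List String) (h : 2 ≤ out.length) :
    PySem.List.insert out 1 "" = out.take 1 ++ [""] ++ out.drop 1 := by
  have := PySem.List.insert_natCast out 1 "" (by omega)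
  simpa using this

theorem pvPostEq (X : List String) :
    (PySem.Str.join "\n"
        (if decide (2 ≤ X.length) && !(PySem.Str.strip (X.getD 1 "") == "") then
          PySem.List.insert X 1 ""
        else X) ++
      (if (if decide (2 ≤ X.length) && !(PySem.Str.strip (X.getD 1 "") == "") then
            PySem.List.insert X 1 ""
          else X).isEmpty then "" else "\n")) =
    (PySem.Str.join "\n"
        (if decide (2 ≤ X.length) && !(PySem.Str.strip (X.getD 1 "") == "") then
          X.take 1 ++ [""] ++ X.drop 1
        else X) ++
      (if (if decide (2 ≤ X.length) && !(PySem.Str.strip (X.getD 1 "") == "") then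
            X.take 1 ++ [""] ++ X.drop 1
          else X).isEmpty then "" else "\n")) := by
  have he :
      (if decide (2 ≤ X.length) && !(PySem.Str.strip (X.getD 1 "") == "") then
        PySem.List.insert X 1 ""
      else X) =
      (if decide (2 ≤ X.length) && !(PySem.Str.strip (X.getD 1 "") == "") then
        X.take 1 ++ [""] ++ X.drop 1
      else X) := by
    split_ifs with h
    · exact pvInsert_eq X (by simp only [Bool.and_eq_true, decide_eq_true_eq] at h; exact h.1)
    · rfl
  rw [he]

-- ===== VERDICT (by name: the statement is the Claim_ definition above) =====
theorem sanitize_block_text_spec : Claim_equal_sanitize_block_text := by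
  intro text _
  show sanitize_block_text text = sanitize_block_text_alt text
  simp only [sanitize_block_text, sanitize_block_text_alt]
  rw [pvCoreEq]
  exact pvPostEq _
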